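-- pv_equiv track=rewrite | github.com/YarelOr-dn/drivenets-topology-studio | scaler/scaler/wizard/parsers.py | get_service_interfaces
-- ===== SOURCE A (Python) =====
-- from typing import Any, Dict, List, Optional, Set
--
-- def extract_hierarchy_section(config: str, hierarchy: str) -> Optional[str]:
--     """Extract a specific hierarchy section from the configuration.
--
--     DNOS hierarchy structure requires each top-level section to end with '!'
--     to properly close it before the next hierarchy begins.
--     """
--     hierarchy_map = {
--         'system': 'system',
--         'interfaces': 'interfaces',
--         'services': 'network-services',
--         'bgp': 'protocols',
--         'vlans': 'interfaces',  # VLANs are within interfaces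
--     }
--
--     target = hierarchy_map.get(hierarchy, hierarchy)
--     lines = config.split('\n')
--     result = []
--     in_section = False
--     indent_level = 0
--
--     for line in lines:
--         stripped = line.lstrip()
--         current_indent = len(line) - len(stripped)
--
--         if stripped.startswith(target) and not in_section:
--             in_section = True
--             indent_level = current_indent
--             result.append(line)
--         elif in_section:
--             # Check if we've hit the next top-level hierarchy or end marker
--             if current_indent == 0 and stripped and not stripped.startswith('!'):
--                 # New top-level section started - close current and stop
--                 break
--             result.append(line)
--             # If this is a closing '!' at the base level, we're done
--             if stripped == '!' and current_indent == 0: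
--                 break
--
--     # Ensure the section ends with '!' for proper DNOS hierarchy closure
--     if result and not result[-1].strip() == '!':
--         result.append('!')
--
--     return '\n'.join(result) if result else None
--
-- def get_service_interfaces(config_text: str) -> Dict[str, List[str]]:
--     """
--     Get service-attached interfaces categorized by type.
--
--     Returns:
--         Dict with keys:
--         - 'pwhe': PWHE interfaces (ph*)
--         - 'l2ac': L2-AC interfaces (with l2-service enabled)
--         - 'irb': IRB interfaces
--     """
--     result = {
--         'pwhe': [],
--         'l2ac': [],
--         'irb': []
--     }
--
--     iface_section = extract_hierarchy_section(config_text, 'interfaces')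
--     if not iface_section:
--         return result
--
--     lines = iface_section.split('\n')
--     current_iface = None
--     has_l2_service = False
--
--     for line in lines:
--         stripped = line.strip()
--         indent = len(line) - len(line.lstrip())
--
--         # New interface at 2-space indent
--         if indent == 2 and stripped and not stripped.startswith('!'):
--             # Save previous interface if it had l2-service
--             if current_iface and has_l2_service:
--                 if not current_iface.startswith('ph') and not current_iface.startswith('irb'):
--                     result['l2ac'].append(current_iface)
--
--             current_iface = stripped
--             has_l2_service = False
--
--             # Check if PWHE
--             if current_iface.startswith('ph'):
--                 result['pwhe'].append(current_iface)
--             elif current_iface.startswith('irb'):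
--                 result['irb'].append(current_iface)
--
--         # Check for l2-service enabled
--         elif stripped == 'l2-service enabled':
--             has_l2_service = True
--
--     # Handle last interface
--     if current_iface and has_l2_service:
--         if not current_iface.startswith('ph') and not current_iface.startswith('irb'):
--             result['l2ac'].append(current_iface)
--
--     return result
-- ===== SOURCE B (Python) =====
-- from typing import Dict, List, Optional
--
--
-- def extract_hierarchy_section(config: str, hierarchy: str) -> Optional[str]:
--     hierarchy_map = {
--         'system': 'system',
--         'interfaces': 'interfaces',
--         'services': 'network-services',
--         'bgp': 'protocols',
--         'vlans': 'interfaces',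
--     }
--     target = hierarchy_map.get(hierarchy, hierarchy)
--     lines = config.split('\n')
--     result = []
--     in_section = False
--     for line in lines:
--         stripped = line.lstrip()
--         current_indent = len(line) - len(stripped)
--         if stripped.startswith(target) and not in_section:
--             in_section = True
--             result.append(line)
--         elif in_section:
--             if current_indent == 0 and stripped and not stripped.startswith('!'):
--                 break
--             result.append(line)
--             if stripped == '!' and current_indent == 0:
--                 break
--     if result and not result[-1].strip() == '!':
--         result.append('!')
--     return '\n'.join(result) if result else None
--
--
-- def _is_header(line: str) -> bool:
--     stripped = line.strip()
--     indent = len(line) - len(line.lstrip())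
--     return indent == 2 and bool(stripped) and not stripped.startswith('!')
--
--
-- def get_service_interfaces(config_text: str) -> Dict[str, List[str]]:
--     result = {'pwhe': [], 'l2ac': [], 'irb': []}
--     iface_section = extract_hierarchy_section(config_text, 'interfaces')
--     if not iface_section:
--         return result
--     lines = iface_section.split('\n')
--     n = len(lines)
--     k = 0
--     # group the lines into per-interface blocks and classify each block directly
--     while k < n:
--         line = lines[k]
--         k += 1
--         if not _is_header(line):
--             continue
--         header = line.strip()
--         body = []
--         while k < n and not _is_header(lines[k]):
--             body.append(lines[k].strip())
--             k += 1
--         if header.startswith('ph'):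
--             result['pwhe'].append(header)
--         elif header.startswith('irb'):
--             result['irb'].append(header)
--         elif 'l2-service enabled' in body:
--             result['l2ac'].append(header)
--     return result
-- ===== Notes on version B (the rewrite author's own statement) =====
-- stated objective: alternative
-- what changed: get_service_interfaces's deferred flush-previous-interface state machine (current_iface/has_l2_service carried across the loop) is replaced by a group-then-classify pass: an inner scan consumes each interface block (header line plus its non-header body) and the block is classified immediately, the l2-service marker being tested by membership in the block's stripped body.
import Mathlib
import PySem

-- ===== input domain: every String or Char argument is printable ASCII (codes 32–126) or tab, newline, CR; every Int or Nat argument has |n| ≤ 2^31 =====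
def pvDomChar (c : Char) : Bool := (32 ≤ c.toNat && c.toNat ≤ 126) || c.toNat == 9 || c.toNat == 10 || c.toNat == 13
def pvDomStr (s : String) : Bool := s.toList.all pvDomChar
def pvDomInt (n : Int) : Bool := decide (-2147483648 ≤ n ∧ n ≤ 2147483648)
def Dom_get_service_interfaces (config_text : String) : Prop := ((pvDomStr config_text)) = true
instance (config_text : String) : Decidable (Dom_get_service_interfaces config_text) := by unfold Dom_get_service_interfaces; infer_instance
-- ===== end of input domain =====

-- B replaces A's deferred flush-previous-interface state machine by a group-then-classify pass
-- over per-interface blocks (same cost; order and values identical, proved below).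
-- The Python dict result with the three fixed keys 'pwhe'/'l2ac'/'irb' is carried as three lists
-- and assembled as the association list [("pwhe",…),("l2ac",…),("irb",…)] (insertion order).

-- ===== PORT A =====
-- shared helpers (both Pythons contain them verbatim): split('\n') and extract_hierarchy_section
def pvSplitNL (s : String) : List String := (PySem.Str.split? s "\n").getD []  -- sep "\n" ≠ "": split? is never none

def pvEhsLoop (target : String) : List String → List String → Bool → List String
  | [], result, _ => result
  | line :: rest, result, inSection =>
    let stripped := PySem.Str.lstrip line
    let currentIndent := PySem.Str.len line - PySem.Str.len stripped
    if PySem.Str.startswith stripped target && !inSection then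
      pvEhsLoop target rest (result ++ [line]) true
    else if inSection then
      if currentIndent == 0 && !(stripped == "") && !PySem.Str.startswith stripped "!" then
        result                                   -- break
      else
        let result' := result ++ [line]
        if stripped == "!" && currentIndent == 0 then result'   -- break
        else pvEhsLoop target rest result' inSection
    else pvEhsLoop target rest result inSection

def extractHierarchySection (config : String) (hierarchy : String) : Option String :=
  let hierarchyMap : PySem.Dict String String := PySem.Dict.ofList
    [("system", "system"), ("interfaces", "interfaces"), ("services", "network-services"),
     ("bgp", "protocols"), ("vlans", "interfaces")]
  let target := PySem.Dict.getD hierarchyMap hierarchy hierarchy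
  let lines := pvSplitNL config
  let result := pvEhsLoop target lines [] false
  -- `indent_level` of the Python loop is assigned but never read; it is omitted.
  let result := if !result.isEmpty && !(PySem.Str.strip (result.getLastD "") == "!")
                then result ++ ["!"] else result
  if !result.isEmpty then some (PySem.Str.join "\n" result) else none

-- A's loop state: (result['pwhe'], result['l2ac'], result['irb'], current_iface, has_l2_service)
def pvStepA (st : List String × List String × List String × Option String × Bool) (line : String) :
    List String × List String × List String × Option String × Bool :=
  let (p, a, i, cur, flag) := st
  let stripped := PySem.Str.strip line
  let indent := PySem.Str.len line - PySem.Str.len (PySem.Str.lstrip line)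
  if indent == 2 && !(stripped == "") && !PySem.Str.startswith stripped "!" then
    let a' := match cur with
      | some c =>
          if flag && (!PySem.Str.startswith c "ph" && !PySem.Str.startswith c "irb")
          then a ++ [c] else a
      | none => a
    let p' := if PySem.Str.startswith stripped "ph" then p ++ [stripped] else p
    let i' := if !PySem.Str.startswith stripped "ph" && PySem.Str.startswith stripped "irb"
              then i ++ [stripped] else i
    (p', a', i', some stripped, false)
  else if stripped == "l2-service enabled" then (p, a, i, cur, true)
  else (p, a, i, cur, flag)

-- the trailing "Handle last interface" flush of A
def pvFinishA (st : List String × List String × List String × Option String × Bool) :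
    List String × List String × List String :=
  let (p, a, i, cur, flag) := st
  match cur with
  | some c =>
      if flag && (!PySem.Str.startswith c "ph" && !PySem.Str.startswith c "irb")
      then (p, a ++ [c], i) else (p, a, i)
  | none => (p, a, i)

def get_service_interfaces (config_text : String) : List (String × List String) :=
  match extractHierarchySection config_text "interfaces" with
  | none => [("pwhe", []), ("l2ac", []), ("irb", [])]
  | some s =>
    if s == "" then [("pwhe", []), ("l2ac", []), ("irb", [])]
    else
      let lines := pvSplitNL s
      let t := pvFinishA (lines.foldl pvStepA ([], [], [], none, false))
      [("pwhe", t.1), ("l2ac", t.2.1), ("irb", t.2.2)]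

-- ===== PORT B =====
def pvIsHeader (line : String) : Bool :=
  let stripped := PySem.Str.strip line
  let indent := PySem.Str.len line - PySem.Str.len (PySem.Str.lstrip line)
  indent == 2 && !(stripped == "") && !PySem.Str.startswith stripped "!"

-- B's while loop: skip non-headers; at a header consume its body block and classify at once
def pvAltGo : List String → List String → List String → List String →
    List String × List String × List String
  | [], p, a, i => (p, a, i)
  | line :: rest, p, a, i =>
    if pvIsHeader line then
      let header := PySem.Str.strip line
      let body := (rest.takeWhile (fun x => !pvIsHeader x)).map PySem.Str.strip
      let rest' := rest.dropWhile (fun x => !pvIsHeader x)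
      if PySem.Str.startswith header "ph" then pvAltGo rest' (p ++ [header]) a i
      else if PySem.Str.startswith header "irb" then pvAltGo rest' p a (i ++ [header])
      else if body.contains "l2-service enabled" then pvAltGo rest' p (a ++ [header]) i
      else pvAltGo rest' p a i
    else pvAltGo rest p a i
termination_by l _ _ _ => l.length
decreasing_by
  all_goals simp only [List.length_cons]
  all_goals first
    | exact Nat.lt_succ_of_le (List.length_dropWhile_le _ _)
    | exact Nat.lt_succ_self _

def get_service_interfaces_alt (config_text : String) : List (String × List String) :=
  match extractHierarchySection config_text "interfaces" with
  | none => [("pwhe", []), ("l2ac", []), ("irb", [])]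
  | some s =>
    if s == "" then [("pwhe", []), ("l2ac", []), ("irb", [])]
    else
      let t := pvAltGo (pvSplitNL s) [] [] []
      [("pwhe", t.1), ("l2ac", t.2.1), ("irb", t.2.2)]

-- ===== PRECONDITION & SPEC =====
def Spec_get_service_interfaces (config_text : String) (out : List (String × List String)) : Prop := out = get_service_interfaces_alt config_text
instance (config_text : String) (out : List (String × List String)) : Decidable (Spec_get_service_interfaces config_text out) := by unfold Spec_get_service_interfaces; infer_instance

-- ===== CLAIM (what is proved, stated in full; the proofs are below) =====
def Claim_equal_get_service_interfaces : Prop := ∀ (config_text : String), Dom_get_service_interfaces config_text → Spec_get_service_interfaces config_text (get_service_interfaces config_text)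

-- ===== LEMMAS AND PROOFS =====

-- membership test in the stripped body = any-scan of the unstripped block
lemma pv_contains_map (ys : List String) :
    ((ys.map PySem.Str.strip).contains "l2-service enabled") =
      ys.any (fun x => PySem.Str.strip x == "l2-service enabled") := by
  induction ys with
  | nil => rfl
  | cons y ys ih =>
      simp only [List.map_cons, List.contains_cons, List.any_cons, ih]
      rw [BEq.comm]

-- one block step of pvAltGo, in the shape A's header step produces
lemma pv_altGo_block (l : String) (rest p a i : List String) (h : pvIsHeader l = true) :
    pvAltGo (l :: rest) p a i =
      pvAltGo (rest.dropWhile (fun x => !pvIsHeader x))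
        (if PySem.Str.startswith (PySem.Str.strip l) "ph" then p ++ [PySem.Str.strip l] else p)
        (if ((rest.takeWhile (fun x => !pvIsHeader x)).any
              (fun x => PySem.Str.strip x == "l2-service enabled")
            && (!PySem.Str.startswith (PySem.Str.strip l) "ph"
                && !PySem.Str.startswith (PySem.Str.strip l) "irb"))
         then a ++ [PySem.Str.strip l] else a)
        (if (!PySem.Str.startswith (PySem.Str.strip l) "ph"
             && PySem.Str.startswith (PySem.Str.strip l) "irb")
         then i ++ [PySem.Str.strip l] else i) := by
  rw [pvAltGo, if_pos h]
  simp only [pv_contains_map]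
  cases hph : PySem.Str.startswith (PySem.Str.strip l) "ph" with
  | true => simp
  | false =>
    cases hirb : PySem.Str.startswith (PySem.Str.strip l) "irb" with
    | true => simp
    | false =>
      cases hcon : (rest.takeWhile (fun x => !pvIsHeader x)).any
          (fun x => PySem.Str.strip x == "l2-service enabled") with
      | true => simp
      | false => simp

-- A's loop from a pending interface = flush the pending block, continue at the next header
lemma pv_foldl_some (lines : List String) : ∀ (p a i : List String) (c : String) (b : Bool),
    pvFinishA (lines.foldl pvStepA (p, a, i, some c, b)) =
      pvAltGo (lines.dropWhile (fun x => !pvIsHeader x)) p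
        (if ((b || (lines.takeWhile (fun x => !pvIsHeader x)).any
                (fun x => PySem.Str.strip x == "l2-service enabled"))
            && (!PySem.Str.startswith c "ph" && !PySem.Str.startswith c "irb"))
         then a ++ [c] else a) i := by
  induction lines with
  | nil =>
      intro p a i c b
      simp only [List.foldl_nil, List.takeWhile_nil, List.dropWhile_nil, List.any_nil,
        Bool.or_false, pvFinishA, pvAltGo]
      split_ifs <;> simp_all
  | cons l rest ih =>
    intro p a i c b
    by_cases h : pvIsHeader l = true
    · have hstep : pvStepA (p, a, i, some c, b) l =
        ((if PySem.Str.startswith (PySem.Str.strip l) "ph" then p ++ [PySem.Str.strip l] else p),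
         (if (b && (!PySem.Str.startswith c "ph" && !PySem.Str.startswith c "irb"))
          then a ++ [c] else a),
         (if (!PySem.Str.startswith (PySem.Str.strip l) "ph"
              && PySem.Str.startswith (PySem.Str.strip l) "irb")
          then i ++ [PySem.Str.strip l] else i),
         some (PySem.Str.strip l), false) := by
        simp only [pvStepA]
        rw [if_pos (by simpa [pvIsHeader] using h)]
      rw [List.foldl_cons, hstep, ih]
      rw [List.dropWhile_cons_of_neg (by simp [h]), List.takeWhile_cons_of_neg (by simp [h])]
      rw [pv_altGo_block l rest _ _ _ h]
      simp
    · have hsb : pvIsHeader l = false := by simpa using h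
      by_cases hf : PySem.Str.strip l == "l2-service enabled"
      · have hstep : pvStepA (p, a, i, some c, b) l = (p, a, i, some c, true) := by
          simp only [pvStepA]
          rw [if_neg (by simpa [pvIsHeader] using h), if_pos hf]
        rw [List.foldl_cons, hstep, ih]
        rw [List.dropWhile_cons_of_pos (by simp [hsb]), List.takeWhile_cons_of_pos (by simp [hsb])]
        simp [hf]
      · have hstep : pvStepA (p, a, i, some c, b) l = (p, a, i, some c, b) := by
          simp only [pvStepA]
          rw [if_neg (by simpa [pvIsHeader] using h), if_neg hf]
        rw [List.foldl_cons, hstep, ih]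
        rw [List.dropWhile_cons_of_pos (by simp [hsb]), List.takeWhile_cons_of_pos (by simp [hsb])]
        simp [hf]

-- A's loop from the initial no-pending state computes B's block classification
lemma pv_foldl_none (lines : List String) : ∀ (p a i : List String) (b : Bool),
    pvFinishA (lines.foldl pvStepA (p, a, i, none, b)) = pvAltGo lines p a i := by
  induction lines with
  | nil => intro p a i b; simp [pvFinishA, pvAltGo]
  | cons l rest ih =>
    intro p a i b
    by_cases h : pvIsHeader l = true
    · have hstep : pvStepA (p, a, i, none, b) l =
        ((if PySem.Str.startswith (PySem.Str.strip l) "ph" then p ++ [PySem.Str.strip l] else p),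
         a,
         (if (!PySem.Str.startswith (PySem.Str.strip l) "ph"
              && PySem.Str.startswith (PySem.Str.strip l) "irb")
          then i ++ [PySem.Str.strip l] else i),
         some (PySem.Str.strip l), false) := by
        simp only [pvStepA]
        rw [if_pos (by simpa [pvIsHeader] using h)]
      rw [List.foldl_cons, hstep, pv_foldl_some, pv_altGo_block l rest _ _ _ h]
      simp
    · have hsb : pvIsHeader l = false := by simpa using h
      by_cases hf : PySem.Str.strip l == "l2-service enabled"
      · have hstep : pvStepA (p, a, i, none, b) l = (p, a, i, none, true) := by
          simp only [pvStepA]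
          rw [if_neg (by simpa [pvIsHeader] using h), if_pos hf]
        rw [List.foldl_cons, hstep, ih, pvAltGo, if_neg (by simp [hsb])]
      · have hstep : pvStepA (p, a, i, none, b) l = (p, a, i, none, b) := by
          simp only [pvStepA]
          rw [if_neg (by simpa [pvIsHeader] using h), if_neg hf]
        rw [List.foldl_cons, hstep, ih, pvAltGo, if_neg (by simp [hsb])]

-- ===== VERDICT (by name: the statement is the Claim_ definition above) =====
theorem get_service_interfaces_spec : Claim_equal_get_service_interfaces := by
  intro config_text _
  unfold Spec_get_service_interfaces get_service_interfaces get_service_interfaces_alt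
  cases extractHierarchySection config_text "interfaces" with
  | none => rfl
  | some s =>
    by_cases hs : s == ""
    · simp [hs]
    · simp only [hs, Bool.false_eq_true]
      rw [pv_foldl_none]
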